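-- pv_equiv track=rewrite | github.com/WillWimbi/Pedagogical-PC | pcTesting.py | _uDiv_nonrestoring
-- ===== SOURCE A (Python) =====
-- def FA(a, b, c):                            # full-adder
--     s  = a ^ b ^ c
--     co = (a & b) | (b & c) | (a & c)
--     return s, co
--
-- def addBits(a, b, cin=False):               # n-bit adder
--     out, c = [], cin
--     for i in range(len(a)):
--         s, c = FA(a[i], b[i], c)
--         out.append(s)
--     return out, c
--
-- def twoComp(v):                             # two’s-complement negate
--     inv = [not b for b in v]
--     one = [True] + [False]*(len(v)-1)
--     return addBits(inv, one)[0]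
--
-- def subBits(a, b):                          # a − b
--     return addBits(a, twoComp(b))[0]
--
-- def shiftLeft(bits, in_bit):                # logical shift-left by 1
--     return [in_bit] + bits[:-1]
--
-- def _uDiv_nonrestoring(dividend, divisor):
--     """Unsigned, non-restoring division (n-bit) → (Q, R)"""
--     n   = len(dividend)
--     Q   = [False]*n
--     R   = [False]*(n+1)            # one extra sign bit
--     D   = divisor + [False]        # align width
--
--     for i in range(n-1, -1, -1):   # MSB → LSB
--         R = shiftLeft(R, dividend[i])
--
--         if not R[-1]:              # R ≥ 0 → subtract
--             R = subBits(R, D)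
--         else:                      # R < 0 → add
--             R, _ = addBits(R, D)
--
--         Q[i] = not R[-1]           # quotient bit = ¬sign(R)
--
--     if R[-1]:                      # final sign fix if negative
--         R, _ = addBits(R, D)
--
--     return Q, R[:-1]               # drop extra sign bit
-- ===== SOURCE B (Python) =====
-- def _uDiv_nonrestoring(dividend, divisor):
--     """Unsigned, non-restoring division (n-bit) -> (Q, R), as integer arithmetic
--     on the value of the (n+1)-bit datapath instead of bit-vector ripple adders."""
--     n = len(dividend)
--     M = 1 << (n + 1)               # the datapath wraps modulo 2^(n+1)
--     d = 0                          # unsigned value of the aligned divisor word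
--     for j, bit in enumerate(divisor[:n + 1]):
--         if bit:
--             d += 1 << j
--     r = 0                          # unsigned value of the remainder word
--     qbits = []                     # quotient bits, MSB first
--     for i in range(n - 1, -1, -1):
--         r = (2 * r + (1 if dividend[i] else 0)) % M
--         if r < M // 2:             # sign bit clear -> subtract
--             r = (r + M - d) % M
--         else:                      # sign bit set -> add back
--             r = (r + d) % M
--         qbits.append(r < M // 2)
--     if r >= M // 2:                # final sign fix
--         r = (r + d) % M
--     q = qbits[::-1]
--     rem = [(r >> j) & 1 == 1 for j in range(n)]
--     return q, rem
-- ===== Notes on version B (the rewrite author's own statement) =====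
-- stated objective: faster
-- what changed: Replaced the bit-vector datapath (ripple-carry full adders, two's-complement negation, list shifting) by direct integer arithmetic modulo 2^(n+1) on the value of the remainder word, appending quotient bits MSB-first and decoding the remainder bits at the end.
-- crash fix: When the divisor has fewer bits than the dividend (and the dividend is nonempty) A raises IndexError inside its bit adders; B simply uses the short divisor's value and returns the corresponding quotient/remainder. — e.g. on _uDiv_nonrestoring([true, true], [true]): A raises IndexError, B returns ([true, true], [false, false])
import Mathlib
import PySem

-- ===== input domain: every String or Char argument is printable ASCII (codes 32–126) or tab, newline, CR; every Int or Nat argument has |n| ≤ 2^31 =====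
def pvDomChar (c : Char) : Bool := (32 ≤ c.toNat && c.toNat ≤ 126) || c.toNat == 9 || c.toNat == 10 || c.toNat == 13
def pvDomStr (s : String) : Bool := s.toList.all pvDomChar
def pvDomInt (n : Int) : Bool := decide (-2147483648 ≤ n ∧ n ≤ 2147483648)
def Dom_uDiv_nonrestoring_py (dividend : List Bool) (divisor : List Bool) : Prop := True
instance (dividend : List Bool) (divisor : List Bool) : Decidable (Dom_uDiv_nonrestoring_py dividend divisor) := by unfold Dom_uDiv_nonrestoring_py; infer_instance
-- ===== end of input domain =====

-- B replaces A's bit-vector ripple-adder datapath by integer arithmetic modulo 2^(n+1);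
-- same results, measurably faster by a large constant factor.

-- ===== PORT A =====
def pvFA (a b c : Bool) : Bool × Bool :=
  (xor a (xor b c), (a && b) || (b && c) || (a && c))

-- addBits walks a with b[i]; Python raises IndexError when b is exhausted first
-- (that case is excluded by Pre_, the port just stops there).
def pvAddBits : List Bool → List Bool → Bool → List Bool × Bool
  | [], _, c => ([], c)
  | _ :: _, [], c => ([], c)
  | a :: as, b :: bs, c =>
      let sc := pvFA a b c
      let rest := pvAddBits as bs sc.2
      (sc.1 :: rest.1, rest.2)

def pvTwoComp (v : List Bool) : List Bool :=
  (pvAddBits (v.map (fun b => !b)) (true :: List.replicate (v.length - 1) false) false).1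

def pvSubBits (a b : List Bool) : List Bool :=
  (pvAddBits a (pvTwoComp b) false).1

def pvShiftLeft (bits : List Bool) (inb : Bool) : List Bool :=
  inb :: bits.dropLast

def pvStepA (dividend D : List Bool) (st : List Bool × List Bool) (i : Nat) :
    List Bool × List Bool :=
  let R1 := pvShiftLeft st.2 (dividend.getD i false)
  let R2 := if (R1.getLastD false) = false then pvSubBits R1 D
            else (pvAddBits R1 D false).1
  (st.1.set i (!(R2.getLastD false)), R2)

def uDiv_nonrestoring_py (dividend : List Bool) (divisor : List Bool) :
    List Bool × List Bool :=
  let n := dividend.length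
  let D := divisor ++ [false]
  let fin := List.foldl (pvStepA dividend D)
      (List.replicate n false, List.replicate (n + 1) false) (List.range n).reverse
  let R3 := if fin.2.getLastD false then (pvAddBits fin.2 D false).1 else fin.2
  (fin.1, R3.dropLast)

-- ===== PORT B =====
def pvWordVal : List Bool → Nat → Nat
  | [], _ => 0
  | b :: t, j => (if b then 2 ^ j else 0) + pvWordVal t (j + 1)

def pvStepB (dividend : List Bool) (M d : Nat) (st : Nat × List Bool) (i : Nat) :
    Nat × List Bool :=
  let r1 := (2 * st.1 + (if dividend.getD i false then 1 else 0)) % M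
  let r2 := if r1 < M / 2 then (r1 + M - d) % M else (r1 + d) % M
  (r2, st.2 ++ [decide (r2 < M / 2)])

def uDiv_nonrestoring_py_alt (dividend : List Bool) (divisor : List Bool) :
    List Bool × List Bool :=
  let n := dividend.length
  let M := 2 ^ (n + 1)
  let d := pvWordVal (divisor.take (n + 1)) 0
  let fin := List.foldl (pvStepB dividend M d) (0, []) (List.range n).reverse
  let r3 := if M / 2 ≤ fin.1 then (fin.1 + d) % M else fin.1
  (fin.2.reverse, (List.range n).map (fun j => decide ((r3 >>> j) &&& 1 = 1)))

-- ===== PRECONDITION & SPEC =====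
-- A raises IndexError (inside addBits) exactly when the divisor is shorter than the dividend.
def Pre_uDiv_nonrestoring_py (dividend : List Bool) (divisor : List Bool) : Prop :=
  dividend.length ≤ divisor.length
instance (dividend : List Bool) (divisor : List Bool) : Decidable (Pre_uDiv_nonrestoring_py dividend divisor) := by unfold Pre_uDiv_nonrestoring_py; infer_instance

def pvWitness_uDiv_nonrestoring_py : List Bool × List Bool :=
  ([true, false, true], [true, true, false])

-- A raises IndexError when the divisor has fewer bits than a nonempty dividend; B uses the
-- short divisor's value and returns the corresponding quotient/remainder.
def Raises_uDiv_nonrestoring_py (dividend : List Bool) (divisor : List Bool) : Prop :=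
  divisor.length < dividend.length
instance (dividend : List Bool) (divisor : List Bool) : Decidable (Raises_uDiv_nonrestoring_py dividend divisor) := by unfold Raises_uDiv_nonrestoring_py; infer_instance

def pvRaiseWitness_uDiv_nonrestoring_py : List Bool × List Bool :=
  ([true, true], [true])
def pvRaiseWitnessOut_uDiv_nonrestoring_py : List Bool × List Bool :=
  ([true, true], [false, false])

def Spec_uDiv_nonrestoring_py (dividend : List Bool) (divisor : List Bool) (out : List Bool × List Bool) : Prop := out = uDiv_nonrestoring_py_alt dividend divisor
instance (dividend : List Bool) (divisor : List Bool) (out : List Bool × List Bool) : Decidable (Spec_uDiv_nonrestoring_py dividend divisor out) := by unfold Spec_uDiv_nonrestoring_py; infer_instance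

-- ===== CLAIM (what is proved, stated in full; the proofs are below) =====
def Claim_equal_uDiv_nonrestoring_py : Prop := ∀ (dividend : List Bool) (divisor : List Bool), Dom_uDiv_nonrestoring_py dividend divisor → Pre_uDiv_nonrestoring_py dividend divisor → Spec_uDiv_nonrestoring_py dividend divisor (uDiv_nonrestoring_py dividend divisor)

def Claim_raises_uDiv_nonrestoring_py : Prop := (∀ (dividend : List Bool) (divisor : List Bool), Dom_uDiv_nonrestoring_py dividend divisor → Raises_uDiv_nonrestoring_py dividend divisor → ¬ Pre_uDiv_nonrestoring_py dividend divisor) ∧ (Dom_uDiv_nonrestoring_py (pvRaiseWitness_uDiv_nonrestoring_py.1) (pvRaiseWitness_uDiv_nonrestoring_py.2) ∧ Raises_uDiv_nonrestoring_py (pvRaiseWitness_uDiv_nonrestoring_py.1) (pvRaiseWitness_uDiv_nonrestoring_py.2) ∧ uDiv_nonrestoring_py_alt (pvRaiseWitness_uDiv_nonrestoring_py.1) (pvRaiseWitness_uDiv_nonrestoring_py.2) = pvRaiseWitnessOut_uDiv_nonrestoring_py)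

-- ===== LEMMAS AND PROOFS =====
def pvVal : List Bool → Nat
  | [] => 0
  | b :: t => b.toNat + 2 * pvVal t

def pvToBits : Nat → Nat → List Bool
  | 0, _ => []
  | k + 1, x => (decide (x % 2 = 1)) :: pvToBits k (x / 2)

theorem pvVal_lt (l : List Bool) : pvVal l < 2 ^ l.length := by
  induction l with
  | nil => simp [pvVal]
  | cons b t ih => cases b <;> simp [pvVal, pow_succ] <;> omega

theorem pvToBits_length (k x : Nat) : (pvToBits k x).length = k := by
  induction k generalizing x with
  | zero => rfl
  | succ k ih => simp [pvToBits, ih]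

theorem pvToBits_congr {k x y : Nat} (h : x % 2 ^ k = y % 2 ^ k) :
    pvToBits k x = pvToBits k y := by
  induction k generalizing x y with
  | zero => rfl
  | succ k ih =>
    rw [show (2:Nat) ^ (k + 1) = 2 * 2 ^ k by rw [pow_succ]; ring] at h
    have e1 : x % 2 = y % 2 := by
      rw [← Nat.mod_mod_of_dvd x ⟨2^k, rfl⟩, ← Nat.mod_mod_of_dvd y ⟨2^k, rfl⟩, h]
    have e2 : x / 2 % 2 ^ k = y / 2 % 2 ^ k := by
      rw [← Nat.mod_mul_right_div_self x 2 (2^k), ← Nat.mod_mul_right_div_self y 2 (2^k), h]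
    simp only [pvToBits, e1, ih e2]

theorem pvVal_toBits (k x : Nat) : pvVal (pvToBits k x) = x % 2 ^ k := by
  induction k generalizing x with
  | zero => simp [pvToBits, pvVal, Nat.mod_one]
  | succ k ih =>
    have hp : (2:Nat) ^ (k + 1) = 2 * 2 ^ k := by rw [pow_succ]; ring
    have h1 : x % (2 * 2 ^ k) / 2 = x / 2 % 2 ^ k := Nat.mod_mul_right_div_self x 2 (2^k)
    have h2 : x % (2 * 2 ^ k) % 2 = x % 2 := Nat.mod_mod_of_dvd x ⟨2^k, rfl⟩
    rcases Nat.mod_two_eq_zero_or_one x with h | h <;>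
      simp [pvToBits, pvVal, ih, h, hp] <;> omega

theorem pvToBits_zero (k : Nat) : pvToBits k 0 = List.replicate k false := by
  induction k with
  | zero => rfl
  | succ k ih => simp [pvToBits, ih, List.replicate_succ]

theorem pvToBits_dropLast (k x : Nat) : (pvToBits (k + 1) x).dropLast = pvToBits k x := by
  induction k generalizing x with
  | zero => rfl
  | succ k ih =>
    show (decide (x % 2 = 1) :: pvToBits (k + 1) (x / 2)).dropLast
        = decide (x % 2 = 1) :: pvToBits k (x / 2)
    have hne : pvToBits (k + 1) (x / 2) ≠ [] := by
      intro hc; have := pvToBits_length (k + 1) (x / 2); rw [hc] at this; simp at this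
    rw [List.dropLast_cons_of_ne_nil hne, ih]

theorem pvToBits_getLastD (k x : Nat) (d : Bool) :
    (pvToBits (k + 1) x).getLastD d = decide (x / 2 ^ k % 2 = 1) := by
  induction k generalizing x d with
  | zero => simp [pvToBits]
  | succ k ih =>
    show ((decide (x % 2 = 1)) :: pvToBits (k + 1) (x / 2)).getLastD d = _
    rw [List.getLastD_cons, ih]
    congr 1
    rw [Nat.div_div_eq_div_mul, ← pow_succ']

theorem pvToBits_sign {k x : Nat} (hx : x < 2 ^ (k + 1)) :
    (pvToBits (k + 1) x).getLastD false = decide (2 ^ k ≤ x) := by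
  rw [pvToBits_getLastD]
  have hp : 0 < 2 ^ k := Nat.two_pow_pos k
  have hlt : x / 2 ^ k < 2 := by
    rw [Nat.div_lt_iff_lt_mul hp]; rw [pow_succ] at hx; omega
  by_cases hle : 2 ^ k ≤ x
  · have h1 : 1 ≤ x / 2 ^ k := (Nat.one_le_div_iff hp).mpr hle
    have : x / 2 ^ k = 1 := by omega
    simp [this, hle]
  · have : x / 2 ^ k = 0 := Nat.div_eq_of_lt (Nat.lt_of_not_le hle)
    simp [this, hle]

theorem pvAddBits_fst {a b : List Bool} (c : Bool) (h : a.length ≤ b.length) :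
    (pvAddBits a b c).1 = pvToBits a.length (pvVal a + pvVal b + c.toNat) := by
  induction a generalizing b c with
  | nil => simp [pvAddBits, pvToBits]
  | cons x as ih =>
    cases b with
    | nil => simp at h
    | cons y bs =>
      simp only [List.length_cons, Nat.add_le_add_iff_right] at h
      have hco : (pvFA x y c).2.toNat = (x.toNat + y.toNat + c.toNat) / 2 := by
        cases x <;> cases y <;> cases c <;> rfl
      have hs : (pvFA x y c).1 = decide ((x.toNat + y.toNat + c.toNat) % 2 = 1) := by
        cases x <;> cases y <;> cases c <;> rfl
      show (pvFA x y c).1 :: (pvAddBits as bs (pvFA x y c).2).1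
          = pvToBits (as.length + 1) (pvVal (x :: as) + pvVal (y :: bs) + c.toNat)
      rw [show pvToBits (as.length + 1) (pvVal (x :: as) + pvVal (y :: bs) + c.toNat)
            = decide ((pvVal (x :: as) + pvVal (y :: bs) + c.toNat) % 2 = 1)
              :: pvToBits as.length ((pvVal (x :: as) + pvVal (y :: bs) + c.toNat) / 2) from rfl]
      rw [ih (pvFA x y c).2 h, hs]
      refine congrArg₂ (· :: ·) ?_ ?_
      · rw [decide_eq_decide]; simp only [pvVal]; omega
      · congr 1; rw [hco]; simp only [pvVal]; omega

theorem pvVal_map_not (v : List Bool) :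
    pvVal (v.map (fun b => !b)) = 2 ^ v.length - 1 - pvVal v := by
  induction v with
  | nil => rfl
  | cons b t ih =>
    have := pvVal_lt t
    cases b <;> simp [pvVal, ih, pow_succ] <;> omega

theorem pvVal_replicate_false (m : Nat) : pvVal (List.replicate m false) = 0 := by
  induction m with
  | zero => rfl
  | succ m ih => simp [List.replicate_succ, pvVal, ih]

theorem pvTwoComp_eq (v : List Bool) :
    pvTwoComp v = pvToBits v.length (2 ^ v.length - pvVal v) := by
  have hlen : (v.map (fun b => !b)).length ≤ (true :: List.replicate (v.length - 1) false).length := by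
    simp; cases v <;> simp
  rw [pvTwoComp, pvAddBits_fst false hlen]
  have h1 : pvVal (true :: List.replicate (v.length - 1) false) = 1 := by
    simp [pvVal, pvVal_replicate_false]
  rw [pvVal_map_not, h1]
  have := pvVal_lt v
  simp only [List.length_map, Bool.toNat_false]
  congr 1
  omega

theorem pvSubBits_eq {a b : List Bool} (h : a.length ≤ b.length) :
    pvSubBits a b = pvToBits a.length (pvVal a + (2 ^ b.length - pvVal b)) := by
  rw [pvSubBits, pvTwoComp_eq]
  have hl : a.length ≤ (pvToBits b.length (2 ^ b.length - pvVal b)).length := by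
    rw [pvToBits_length]; exact h
  rw [pvAddBits_fst false hl, pvVal_toBits]
  apply pvToBits_congr
  have hdvd : (2:Nat) ^ a.length ∣ 2 ^ b.length := Nat.pow_dvd_pow 2 h
  exact Nat.ModEq.add_left _ ((Nat.mod_modEq _ _).of_dvd hdvd)

theorem pvAddBits_false {a b : List Bool} (h : a.length ≤ b.length) :
    (pvAddBits a b false).1 = pvToBits a.length (pvVal a + pvVal b) := by
  rw [pvAddBits_fst false h]; rfl

theorem pvShiftLeft_toBits (k r : Nat) (b : Bool) :
    pvShiftLeft (pvToBits (k + 1) r) b = pvToBits (k + 1) (2 * r + b.toNat) := by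
  rw [pvShiftLeft, pvToBits_dropLast]
  show b :: pvToBits k r
      = decide ((2 * r + b.toNat) % 2 = 1) :: pvToBits k ((2 * r + b.toNat) / 2)
  refine congrArg₂ (· :: ·) ?_ ?_
  · cases b <;> simp <;> omega
  · congr 1; cases b <;> simp <;> omega

theorem pvWordVal_eq (l : List Bool) (j : Nat) : pvWordVal l j = 2 ^ j * pvVal l := by
  induction l generalizing j with
  | nil => simp [pvWordVal, pvVal]
  | cons b t ih => cases b <;> simp [pvWordVal, pvVal, ih, pow_succ] <;> ring

theorem pvVal_append (x y : List Bool) :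
    pvVal (x ++ y) = pvVal x + 2 ^ x.length * pvVal y := by
  induction x with
  | nil => simp [pvVal]
  | cons b t ih => simp [pvVal, ih, pow_succ]; ring

-- value of the aligned divisor word D = divisor ++ [false], under Pre_
theorem pvValD_take {dividend divisor : List Bool}
    (hpre : dividend.length ≤ divisor.length) :
    pvVal ((divisor ++ [false]).take (dividend.length + 1))
      = pvVal (divisor.take (dividend.length + 1)) := by
  rcases Nat.lt_or_ge divisor.length (dividend.length + 1) with hlt | hge
  · have hdiv : divisor.length = dividend.length := by omega
    rw [List.take_of_length_le (l := divisor ++ [false]) (by simp; omega),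
        List.take_of_length_le (by omega : divisor.length ≤ dividend.length + 1),
        pvVal_append]
    simp [pvVal]
  · rw [List.take_append_of_le_length hge]

theorem pvValD_split {dividend divisor : List Bool}
    (hpre : dividend.length ≤ divisor.length) :
    ∃ t, pvVal (divisor ++ [false])
        = pvVal (divisor.take (dividend.length + 1)) + 2 ^ (dividend.length + 1) * t := by
  set D := divisor ++ [false] with hD
  have hsplit : D = D.take (dividend.length + 1) ++ D.drop (dividend.length + 1) :=
    (List.take_append_drop _ _).symm
  have hlen : (D.take (dividend.length + 1)).length = dividend.length + 1 := by
    simp [hD]; omega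
  refine ⟨pvVal (D.drop (dividend.length + 1)), ?_⟩
  conv_lhs => rw [hsplit]
  rw [pvVal_append, hlen, pvValD_take hpre]

theorem pvdB_lt {dividend divisor : List Bool} :
    pvVal (divisor.take (dividend.length + 1)) < 2 ^ (dividend.length + 1) := by
  have h := pvVal_lt (divisor.take (dividend.length + 1))
  have hl : (divisor.take (dividend.length + 1)).length ≤ dividend.length + 1 := by
    simp
  calc pvVal (divisor.take (dividend.length + 1))
      < 2 ^ (divisor.take (dividend.length + 1)).length := h
    _ ≤ 2 ^ (dividend.length + 1) := Nat.pow_le_pow_right (by norm_num) hl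

theorem pvSubD_eq {dividend divisor : List Bool} (hpre : dividend.length ≤ divisor.length)
    {r1 : Nat} (h1 : r1 < 2 ^ (dividend.length + 1)) :
    pvSubBits (pvToBits (dividend.length + 1) r1) (divisor ++ [false])
      = pvToBits (dividend.length + 1)
          ((r1 + 2 ^ (dividend.length + 1) - pvVal (divisor.take (dividend.length + 1)))
            % 2 ^ (dividend.length + 1)) := by
  obtain ⟨t, ht⟩ := pvValD_split hpre
  set n := dividend.length with hn
  set M := 2 ^ (n + 1) with hM
  set dB := pvVal (divisor.take (n + 1)) with hdB
  set D := divisor ++ [false] with hDdef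
  have hDlen : D.length = divisor.length + 1 := by simp [hDdef]
  have hlen : (pvToBits (n + 1) r1).length ≤ D.length := by
    rw [pvToBits_length, hDlen]; omega
  rw [pvSubBits_eq hlen, pvToBits_length, pvVal_toBits, Nat.mod_eq_of_lt h1]
  apply pvToBits_congr
  have hP : (2:Nat) ^ D.length = M * 2 ^ (D.length - (n + 1)) := by
    rw [hM, ← pow_add]; congr 1; omega
  have hvD : pvVal D < 2 ^ D.length := pvVal_lt D
  have hdBlt : dB < M := pvdB_lt
  have hLC : (r1 + (2 ^ D.length - pvVal D)) + (pvVal D + dB)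
      = (r1 + dB) + M * 2 ^ (D.length - (n + 1)) := by omega
  have hRC : (r1 + M - dB) + (pvVal D + dB) = (r1 + dB) + M * (t + 1) := by rw [Nat.mul_add, Nat.mul_one]; omega
  have hcan : (r1 + (2 ^ D.length - pvVal D)) + (pvVal D + dB)
      ≡ (r1 + M - dB) + (pvVal D + dB) [MOD M] := by
    show (_ % M = _ % M)
    rw [hLC, hRC, Nat.add_mul_mod_self_left, Nat.add_mul_mod_self_left]
  have hfin := Nat.ModEq.add_right_cancel' (pvVal D + dB) hcan
  rw [Nat.mod_mod_of_dvd _ (dvd_refl M)]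
  exact hfin

theorem pvAddD_eq {dividend divisor : List Bool} (hpre : dividend.length ≤ divisor.length)
    {r1 : Nat} (h1 : r1 < 2 ^ (dividend.length + 1)) :
    (pvAddBits (pvToBits (dividend.length + 1) r1) (divisor ++ [false]) false).1
      = pvToBits (dividend.length + 1)
          ((r1 + pvVal (divisor.take (dividend.length + 1))) % 2 ^ (dividend.length + 1)) := by
  obtain ⟨t, ht⟩ := pvValD_split hpre
  set n := dividend.length with hn
  set M := 2 ^ (n + 1) with hM
  set dB := pvVal (divisor.take (n + 1)) with hdB
  set D := divisor ++ [false] with hDdef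
  have hDlen : D.length = divisor.length + 1 := by simp [hDdef]
  have hlen : (pvToBits (n + 1) r1).length ≤ D.length := by
    rw [pvToBits_length, hDlen]; omega
  rw [pvAddBits_false hlen, pvToBits_length, pvVal_toBits, Nat.mod_eq_of_lt h1]
  apply pvToBits_congr
  have e : r1 + pvVal D = (r1 + dB) + M * t := by omega
  rw [e, Nat.add_mul_mod_self_left, Nat.mod_mod_of_dvd _ (dvd_refl M)]

theorem pvStepB_eq (dividend : List Bool) (M d : Nat) (r : Nat) (qb : List Bool) (i : Nat) :
    pvStepB dividend M d (r, qb) i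
      = ((if (2 * r + (if dividend.getD i false then 1 else 0)) % M < M / 2
            then ((2 * r + (if dividend.getD i false then 1 else 0)) % M + M - d) % M
            else ((2 * r + (if dividend.getD i false then 1 else 0)) % M + d) % M),
         qb ++ [decide ((if (2 * r + (if dividend.getD i false then 1 else 0)) % M < M / 2
            then ((2 * r + (if dividend.getD i false then 1 else 0)) % M + M - d) % M
            else ((2 * r + (if dividend.getD i false then 1 else 0)) % M + d) % M) < M / 2)]) := rfl

theorem pvStepA_eq {dividend divisor : List Bool} (hpre : dividend.length ≤ divisor.length)
    (i : Nat) (Q : List Bool) {r : Nat} (hr : r < 2 ^ (dividend.length + 1)) :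
    pvStepA dividend (divisor ++ [false]) (Q, pvToBits (dividend.length + 1) r) i
      = (Q.set i (decide ((if (2 * r + (if dividend.getD i false then 1 else 0)) % 2 ^ (dividend.length + 1) < 2 ^ (dividend.length + 1) / 2
            then ((2 * r + (if dividend.getD i false then 1 else 0)) % 2 ^ (dividend.length + 1) + 2 ^ (dividend.length + 1) - pvVal (divisor.take (dividend.length + 1))) % 2 ^ (dividend.length + 1)
            else ((2 * r + (if dividend.getD i false then 1 else 0)) % 2 ^ (dividend.length + 1) + pvVal (divisor.take (dividend.length + 1))) % 2 ^ (dividend.length + 1)) < 2 ^ (dividend.length + 1) / 2)),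
         pvToBits (dividend.length + 1)
           (if (2 * r + (if dividend.getD i false then 1 else 0)) % 2 ^ (dividend.length + 1) < 2 ^ (dividend.length + 1) / 2
            then ((2 * r + (if dividend.getD i false then 1 else 0)) % 2 ^ (dividend.length + 1) + 2 ^ (dividend.length + 1) - pvVal (divisor.take (dividend.length + 1))) % 2 ^ (dividend.length + 1)
            else ((2 * r + (if dividend.getD i false then 1 else 0)) % 2 ^ (dividend.length + 1) + pvVal (divisor.take (dividend.length + 1))) % 2 ^ (dividend.length + 1))) := by
  set n := dividend.length with hn
  set M := 2 ^ (n + 1) with hM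
  set dB := pvVal (divisor.take (n + 1)) with hdB
  set r1 := (2 * r + (if dividend.getD i false then 1 else 0)) % M with hr1def
  have hMpos : 0 < M := Nat.two_pow_pos (n + 1)
  have hM2 : M / 2 = 2 ^ n := by rw [hM, pow_succ]; omega
  have hr1 : r1 < M := Nat.mod_lt _ hMpos
  have hshift : pvShiftLeft (pvToBits (n + 1) r) (dividend.getD i false)
      = pvToBits (n + 1) r1 := by
    rw [pvShiftLeft_toBits]
    apply pvToBits_congr
    rw [hr1def, Nat.mod_mod_of_dvd _ (dvd_refl M)]
    congr 2
    cases dividend.getD i false <;> rfl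
  have hsign1 : (pvToBits (n + 1) r1).getLastD false = decide (2 ^ n ≤ r1) :=
    pvToBits_sign hr1
  simp only [pvStepA, hshift, hsign1]
  by_cases hc : r1 < 2 ^ n
  · have hcond : r1 < M / 2 := by rw [hM2]; exact hc
    have hd1 : decide (2 ^ n ≤ r1) = false := by simp; omega
    have hr2 : (r1 + M - dB) % M < M := Nat.mod_lt _ hMpos
    simp only [hd1, if_pos hcond, reduceIte]
    rw [pvSubD_eq hpre hr1, pvToBits_sign hr2]
    refine congrArg₂ Prod.mk ?_ rfl
    congr 1
    rw [hM2]
    by_cases hq : 2 ^ n ≤ (r1 + M - dB) % M <;> simp [hq] <;> omega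
  · have hcond : ¬ r1 < M / 2 := by rw [hM2]; exact hc
    have hd1 : decide (2 ^ n ≤ r1) = true := by simp; omega
    have hr2 : (r1 + dB) % M < M := Nat.mod_lt _ hMpos
    simp only [hd1, if_neg hcond]
    rw [if_neg (by simp : ¬ (true = false)), pvAddD_eq hpre hr1, pvToBits_sign hr2]
    refine congrArg₂ Prod.mk ?_ rfl
    congr 1
    rw [hM2]
    by_cases hq : 2 ^ n ≤ (r1 + dB) % M <;> simp [hq] <;> omega

theorem pvSet_replicate_append (k : Nat) (H : List Bool) (b : Bool) :
    (List.replicate (k + 1) false ++ H).set k b = List.replicate k false ++ (b :: H) := by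
  rw [List.replicate_succ', List.append_assoc,
      List.set_append_right k b (by simp)]
  simp

theorem pvFold_eq {dividend divisor : List Bool} (hpre : dividend.length ≤ divisor.length) :
    ∀ (k : Nat) (H qb : List Bool) (r : Nat), qb.reverse = H → r < 2 ^ (dividend.length + 1) →
    (List.foldl (pvStepA dividend (divisor ++ [false]))
        (List.replicate k false ++ H, pvToBits (dividend.length + 1) r) (List.range k).reverse
      = ((List.foldl (pvStepB dividend (2 ^ (dividend.length + 1))
            (pvVal (divisor.take (dividend.length + 1)))) (r, qb) (List.range k).reverse).2.reverse,
         pvToBits (dividend.length + 1)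
           (List.foldl (pvStepB dividend (2 ^ (dividend.length + 1))
            (pvVal (divisor.take (dividend.length + 1)))) (r, qb) (List.range k).reverse).1))
    ∧ (List.foldl (pvStepB dividend (2 ^ (dividend.length + 1))
         (pvVal (divisor.take (dividend.length + 1)))) (r, qb) (List.range k).reverse).1
        < 2 ^ (dividend.length + 1) := by
  intro k
  induction k with
  | zero =>
    intro H qb r hrev hr
    exact ⟨by simp [hrev], hr⟩
  | succ k ih =>
    intro H qb r hrev hr
    have hrange : (List.range (k + 1)).reverse = k :: (List.range k).reverse := by
      rw [List.range_succ, List.reverse_append]; rfl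
    rw [hrange, List.foldl_cons, List.foldl_cons]
    rw [pvStepA_eq hpre k (List.replicate (k + 1) false ++ H) hr]
    rw [pvStepB_eq]
    set M := 2 ^ (dividend.length + 1) with hM
    set dB := pvVal (divisor.take (dividend.length + 1)) with hdB
    set r2 := (if (2 * r + (if dividend.getD k false then 1 else 0)) % M < M / 2
            then ((2 * r + (if dividend.getD k false then 1 else 0)) % M + M - dB) % M
            else ((2 * r + (if dividend.getD k false then 1 else 0)) % M + dB) % M) with hr2def
    have hMpos : 0 < M := Nat.two_pow_pos (dividend.length + 1)
    have hr2 : r2 < M := by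
      rw [hr2def]; split <;> (try split) <;> exact Nat.mod_lt _ hMpos
    rw [pvSet_replicate_append]
    exact ih (decide (r2 < M / 2) :: H) (qb ++ [decide (r2 < M / 2)]) r2
      (by simp [hrev]) hr2

theorem pvToBits_eq_map (k : Nat) : ∀ x : Nat,
    pvToBits k x = (List.range k).map (fun j => decide ((x >>> j) &&& 1 = 1)) := by
  induction k with
  | zero => intro x; rfl
  | succ k ih =>
    intro x
    rw [List.range_succ_eq_map, List.map_cons, List.map_map]
    show (decide (x % 2 = 1)) :: pvToBits k (x / 2) = _
    refine congrArg₂ (· :: ·) ?_ ?_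
    · simp [Nat.shiftRight_zero, Nat.and_one_is_mod]
    · rw [ih (x / 2)]
      apply List.map_congr_left
      intro j _
      have hsh : x >>> (j + 1) = (x / 2) >>> j := by
        rw [Nat.add_comm j 1, Nat.shiftRight_add, Nat.shiftRight_one]
      simp [Nat.succ_eq_add_one, hsh, Nat.testBit_add_one]

theorem pvMain {dividend divisor : List Bool} (hpre : dividend.length ≤ divisor.length) :
    uDiv_nonrestoring_py dividend divisor = uDiv_nonrestoring_py_alt dividend divisor := by
  have hMpos : 0 < 2 ^ (dividend.length + 1) := Nat.two_pow_pos _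
  have hM2 : 2 ^ (dividend.length + 1) / 2 = 2 ^ dividend.length := by rw [pow_succ]; omega
  obtain ⟨hfold, hlt⟩ := pvFold_eq hpre dividend.length [] [] 0 rfl hMpos
  rw [uDiv_nonrestoring_py, uDiv_nonrestoring_py_alt]
  rw [show pvWordVal (divisor.take (dividend.length + 1)) 0
        = pvVal (divisor.take (dividend.length + 1)) by rw [pvWordVal_eq, pow_zero, one_mul]]
  rw [show (List.replicate dividend.length false, List.replicate (dividend.length + 1) false)
        = (List.replicate dividend.length false ++ ([] : List Bool),
           pvToBits (dividend.length + 1) 0) by rw [pvToBits_zero, List.append_nil]]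
  rw [hfold]
  generalize hF : List.foldl
      (pvStepB dividend (2 ^ (dividend.length + 1)) (pvVal (divisor.take (dividend.length + 1))))
      (0, ([] : List Bool)) (List.range dividend.length).reverse = fb at hlt ⊢
  obtain ⟨rF, qbF⟩ := fb
  simp only at hlt ⊢
  rw [pvToBits_sign hlt, hM2]
  by_cases hs : 2 ^ dividend.length ≤ rF
  · rw [decide_eq_true hs, if_pos rfl, if_pos hs, pvAddD_eq hpre hlt,
        pvToBits_dropLast, pvToBits_eq_map]
  · rw [decide_eq_false hs, if_neg (by simp), if_neg hs, pvToBits_dropLast, pvToBits_eq_map]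

-- ===== VERDICT (by name: the statement is the Claim_ definition above) =====
theorem uDiv_nonrestoring_py_spec : Claim_equal_uDiv_nonrestoring_py := by
  intro dividend divisor _ hpre
  unfold Spec_uDiv_nonrestoring_py
  exact pvMain hpre

@[simp] theorem uDiv_nonrestoring_py_raises : Claim_raises_uDiv_nonrestoring_py := by
  unfold Claim_raises_uDiv_nonrestoring_py
  exact ⟨fun _ _ _ h => by simpa [Pre_uDiv_nonrestoring_py] using Nat.not_le.mpr h, by decide⟩
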